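-- pv_equiv track=rewrite | github.com/pypi-data/pypi-mirror-342 | packages/SolFuse/solfuse-1.0.4-py3-none-any.whl/solfuse/tools/collect_data.py | filter_paired_commands_only
-- ===== SOURCE A (Python) =====
-- def filter_paired_commands_only(normal_cmds, sm_cmds, cmd_pairs):
--   """
--   过滤命令列表，只保留有配对的命令
--
--   Args:
--       normal_cmds: 普通命令列表
--       sm_cmds: state machine命令列表
--       cmd_pairs: 命令配对关系字典
--
--   Returns:
--       filtered_normal_cmds: 过滤后的普通命令列表
--       filtered_sm_cmds: 过滤后的state machine命令列表
--       filtered_count: 被过滤掉的命令数量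
--   """
--   original_normal_count = len(normal_cmds)
--   original_sm_count = len(sm_cmds)
--
--   # 创建两个集合来快速查询哪些命令有配对
--   normal_with_pair = set()
--   sm_with_pair = set()
--
--   for normal_cmd in normal_cmds:
--     if normal_cmd in cmd_pairs and cmd_pairs[normal_cmd] in sm_cmds:
--       normal_with_pair.add(normal_cmd)
--       sm_with_pair.add(cmd_pairs[normal_cmd])
--
--   for sm_cmd in sm_cmds:
--     if sm_cmd in cmd_pairs and cmd_pairs[sm_cmd] in normal_cmds:
--       sm_with_pair.add(sm_cmd)
--       normal_with_pair.add(cmd_pairs[sm_cmd])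
--
--   # 过滤命令列表
--   filtered_normal_cmds = [cmd for cmd in normal_cmds if cmd in normal_with_pair]
--   filtered_sm_cmds = [cmd for cmd in sm_cmds if cmd in sm_with_pair]
--
--   # 计算过滤掉的命令数量
--   normal_filtered_count = original_normal_count - len(filtered_normal_cmds)
--   sm_filtered_count = original_sm_count - len(filtered_sm_cmds)
--   filtered_count = {
--     "normal": normal_filtered_count,
--     "state_machine": sm_filtered_count,
--     "total": normal_filtered_count + sm_filtered_count,
--   }
--
--   return filtered_normal_cmds, filtered_sm_cmds, filtered_count
-- ===== SOURCE B (Python) =====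
-- def filter_paired_commands_only(normal_cmds, sm_cmds, cmd_pairs):
--   """Direct per-command pairing test: no intermediate 'with_pair' sets are built.
--   A command from one list is kept iff some pairing entry links it (on either side
--   of the pair) to a member of the other list."""
--   normal_set = set(normal_cmds)
--   sm_set = set(sm_cmds)
--   pairs = list(cmd_pairs.items())
--   filtered_normal_cmds = [c for c in normal_cmds
--                           if any((k == c and v in sm_set) or (v == c and k in sm_set)
--                                  for k, v in pairs)]
--   filtered_sm_cmds = [c for c in sm_cmds
--                       if any((k == c and v in normal_set) or (v == c and k in normal_set)
--                              for k, v in pairs)]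
--   nf = len(normal_cmds) - len(filtered_normal_cmds)
--   sf = len(sm_cmds) - len(filtered_sm_cmds)
--   return filtered_normal_cmds, filtered_sm_cmds, {"normal": nf, "state_machine": sf, "total": nf + sf}
-- ===== Notes on version B (the rewrite author's own statement) =====
-- stated objective: simpler
-- what changed: B drops A's two accumulation loops and the intermediate with_pair sets entirely: each command list is filtered by a direct any() test over the pairing entries (a command is kept iff some pair links it, on either side, to a member of the other list), then the same count dict is assembled.
import Mathlib
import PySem

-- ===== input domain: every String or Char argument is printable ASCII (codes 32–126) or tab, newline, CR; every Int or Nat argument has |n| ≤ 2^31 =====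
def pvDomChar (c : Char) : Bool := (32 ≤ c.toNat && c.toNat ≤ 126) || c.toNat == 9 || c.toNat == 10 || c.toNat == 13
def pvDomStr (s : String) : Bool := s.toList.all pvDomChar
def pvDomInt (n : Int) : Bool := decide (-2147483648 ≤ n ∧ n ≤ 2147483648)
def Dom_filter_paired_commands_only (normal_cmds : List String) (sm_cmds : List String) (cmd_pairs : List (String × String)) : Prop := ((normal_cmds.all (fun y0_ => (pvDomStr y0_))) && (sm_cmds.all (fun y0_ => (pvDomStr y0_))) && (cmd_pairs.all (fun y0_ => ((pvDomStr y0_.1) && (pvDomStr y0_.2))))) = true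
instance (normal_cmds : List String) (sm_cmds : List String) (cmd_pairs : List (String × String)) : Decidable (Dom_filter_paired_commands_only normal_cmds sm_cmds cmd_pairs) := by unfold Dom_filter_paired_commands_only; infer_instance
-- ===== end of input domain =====

-- B filters each list by a direct per-command pairing test over the pair entries,
-- with no intermediate 'with_pair' sets: simpler, same return value.

-- ===== PORT A =====
-- A, step for step: two loops building the pair (normal_with_pair, sm_with_pair),
-- then the order-preserving filters and the count dict.
def filter_paired_commands_only (normal_cmds : List String) (sm_cmds : List String) (cmd_pairs : List (String × String)) : List String × List String × (List (String × Int)) :=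
  let d := PySem.Dict.mk cmd_pairs
  let s1 : PySem.Set String × PySem.Set String :=
    normal_cmds.foldl (fun s c =>
      match d.get? c with                     -- 'c in cmd_pairs and cmd_pairs[c] ...'
      | some v => if sm_cmds.contains v then (PySem.Set.add s.1 c, PySem.Set.add s.2 v) else s
      | none => s) (PySem.Set.empty, PySem.Set.empty)
  let s2 : PySem.Set String × PySem.Set String :=
    sm_cmds.foldl (fun s c =>
      match d.get? c with
      | some v => if normal_cmds.contains v then (PySem.Set.add s.1 v, PySem.Set.add s.2 c) else s
      | none => s) s1
  let filtered_normal := normal_cmds.filter (fun c => PySem.Set.contains s2.1 c)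
  let filtered_sm := sm_cmds.filter (fun c => PySem.Set.contains s2.2 c)
  let nf : Int := (normal_cmds.length : Int) - filtered_normal.length
  let sf : Int := (sm_cmds.length : Int) - filtered_sm.length
  (filtered_normal, filtered_sm, [("normal", nf), ("state_machine", sf), ("total", nf + sf)])

-- ===== PORT B =====
-- B, step for step: membership sets of both lists, then each list is filtered by an
-- 'any' test over the pairing entries; same count dict at the end.
def filter_paired_commands_only_alt (normal_cmds : List String) (sm_cmds : List String) (cmd_pairs : List (String × String)) : List String × List String × (List (String × Int)) :=
  let normal_set := PySem.Set.ofList normal_cmds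
  let sm_set := PySem.Set.ofList sm_cmds
  let filtered_normal := normal_cmds.filter (fun c =>
    cmd_pairs.any (fun kv =>
      (kv.1 == c && PySem.Set.contains sm_set kv.2) || (kv.2 == c && PySem.Set.contains sm_set kv.1)))
  let filtered_sm := sm_cmds.filter (fun c =>
    cmd_pairs.any (fun kv =>
      (kv.1 == c && PySem.Set.contains normal_set kv.2) || (kv.2 == c && PySem.Set.contains normal_set kv.1)))
  let nf : Int := (normal_cmds.length : Int) - filtered_normal.length
  let sf : Int := (sm_cmds.length : Int) - filtered_sm.length
  (filtered_normal, filtered_sm, [("normal", nf), ("state_machine", sf), ("total", nf + sf)])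

-- ===== PRECONDITION & SPEC =====
-- Pre_ excludes association lists whose keys repeat: they do not represent any Python dict
-- unambiguously (dict construction collapses duplicate keys), so A's first-match lookup and
-- B's per-entry pass are both defensible readings there.
def Pre_filter_paired_commands_only (normal_cmds : List String) (sm_cmds : List String) (cmd_pairs : List (String × String)) : Prop :=
  (cmd_pairs.map Prod.fst).Nodup
instance (normal_cmds : List String) (sm_cmds : List String) (cmd_pairs : List (String × String)) : Decidable (Pre_filter_paired_commands_only normal_cmds sm_cmds cmd_pairs) := by unfold Pre_filter_paired_commands_only; infer_instance
def pvWitness_filter_paired_commands_only : List String × List String × (List (String × String)) :=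
  (["a", "b"], ["x", "y"], [("a", "x"), ("y", "b")])
def Spec_filter_paired_commands_only (normal_cmds : List String) (sm_cmds : List String) (cmd_pairs : List (String × String)) (out : List String × List String × (List (String × Int))) : Prop := out = filter_paired_commands_only_alt normal_cmds sm_cmds cmd_pairs
instance (normal_cmds : List String) (sm_cmds : List String) (cmd_pairs : List (String × String)) (out : List String × List String × (List (String × Int))) : Decidable (Spec_filter_paired_commands_only normal_cmds sm_cmds cmd_pairs out) := by unfold Spec_filter_paired_commands_only; infer_instance

-- ===== CLAIM (what is proved, stated in full; the proofs are below) =====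
def Claim_equal_filter_paired_commands_only : Prop := ∀ (normal_cmds : List String) (sm_cmds : List String) (cmd_pairs : List (String × String)), Dom_filter_paired_commands_only normal_cmds sm_cmds cmd_pairs → Pre_filter_paired_commands_only normal_cmds sm_cmds cmd_pairs → Spec_filter_paired_commands_only normal_cmds sm_cmds cmd_pairs (filter_paired_commands_only normal_cmds sm_cmds cmd_pairs)

-- ===== LEMMAS AND PROOFS =====

-- membership through A's first loop
theorem memA1 (d : PySem.Dict String String) (sm : List String) (l : List String)
    (acc : PySem.Set String × PySem.Set String) (x : String) :
    (x ∈ (l.foldl (fun s c =>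
      match d.get? c with
      | some v => if sm.contains v then (PySem.Set.add s.1 c, PySem.Set.add s.2 v) else s
      | none => s) acc).1 ↔
      x ∈ acc.1 ∨ ∃ c ∈ l, ∃ v, d.get? c = some v ∧ v ∈ sm ∧ x = c) ∧
    (x ∈ (l.foldl (fun s c =>
      match d.get? c with
      | some v => if sm.contains v then (PySem.Set.add s.1 c, PySem.Set.add s.2 v) else s
      | none => s) acc).2 ↔
      x ∈ acc.2 ∨ ∃ c ∈ l, ∃ v, d.get? c = some v ∧ v ∈ sm ∧ x = v) := by
  induction l generalizing acc with
  | nil => simp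
  | cons c t ih =>
    simp only [List.foldl_cons]
    cases h : d.get? c with
    | none =>
      constructor
      · rw [(ih acc).1]; aesop
      · rw [(ih acc).2]; aesop
    | some v =>
      dsimp only
      by_cases hv : v ∈ sm
      · rw [if_pos (show sm.contains v = true by simpa using hv)]
        constructor
        · rw [(ih _).1]; simp only [PySem.Set.mem_add]; aesop
        · rw [(ih _).2]; simp only [PySem.Set.mem_add]; aesop
      · rw [if_neg (show ¬ sm.contains v = true by simpa using hv)]
        constructor
        · rw [(ih acc).1]; aesop
        · rw [(ih acc).2]; aesop

-- membership through A's second loop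
theorem memA2 (d : PySem.Dict String String) (nl : List String) (l : List String)
    (acc : PySem.Set String × PySem.Set String) (x : String) :
    (x ∈ (l.foldl (fun s c =>
      match d.get? c with
      | some v => if nl.contains v then (PySem.Set.add s.1 v, PySem.Set.add s.2 c) else s
      | none => s) acc).1 ↔
      x ∈ acc.1 ∨ ∃ c ∈ l, ∃ v, d.get? c = some v ∧ v ∈ nl ∧ x = v) ∧
    (x ∈ (l.foldl (fun s c =>
      match d.get? c with
      | some v => if nl.contains v then (PySem.Set.add s.1 v, PySem.Set.add s.2 c) else s
      | none => s) acc).2 ↔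
      x ∈ acc.2 ∨ ∃ c ∈ l, ∃ v, d.get? c = some v ∧ v ∈ nl ∧ x = c) := by
  induction l generalizing acc with
  | nil => simp
  | cons c t ih =>
    simp only [List.foldl_cons]
    cases h : d.get? c with
    | none =>
      dsimp only
      constructor
      · rw [(ih acc).1]; aesop
      · rw [(ih acc).2]; aesop
    | some v =>
      dsimp only
      by_cases hv : v ∈ nl
      · rw [if_pos (show nl.contains v = true by simpa using hv)]
        constructor
        · rw [(ih _).1]; simp only [PySem.Set.mem_add]; aesop
        · rw [(ih _).2]; simp only [PySem.Set.mem_add]; aesop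
      · rw [if_neg (show ¬ nl.contains v = true by simpa using hv)]
        constructor
        · rw [(ih acc).1]; aesop
        · rw [(ih acc).2]; aesop

-- first-match lookup = membership, once the keys are distinct
theorem get?_mk_iff_mem (p : List (String × String)) (hp : (p.map Prod.fst).Nodup)
    (c v : String) : (PySem.Dict.mk p).get? c = some v ↔ (c, v) ∈ p := by
  constructor
  · intro h
    simpa using PySem.Dict.mem_items_of_get?_eq_some (d := PySem.Dict.mk p) h
  · intro h
    exact PySem.Dict.get?_of_mem_items (PySem.Dict.mk p) (by simpa using h) (by simpa [PySem.Dict.keys] using hp)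

-- B's per-command test, as a proposition
theorem anyB (p : List (String × String)) (other : List String) (c : String) :
    (p.any (fun kv =>
      (kv.1 == c && PySem.Set.contains (PySem.Set.ofList other) kv.2) ||
      (kv.2 == c && PySem.Set.contains (PySem.Set.ofList other) kv.1)) = true) ↔
    ∃ kv ∈ p, (kv.1 = c ∧ kv.2 ∈ other) ∨ (kv.2 = c ∧ kv.1 ∈ other) := by
  simp only [List.any_eq_true, Bool.or_eq_true, Bool.and_eq_true, beq_iff_eq,
    PySem.Set.contains_iff, PySem.Set.mem_ofList]

theorem main_eq (n sm : List String) (p : List (String × String))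
    (hp : (p.map Prod.fst).Nodup) :
    filter_paired_commands_only n sm p = filter_paired_commands_only_alt n sm p := by
  have hget : ∀ c v, (PySem.Dict.mk p).get? c = some v ↔ (c, v) ∈ p :=
    get?_mk_iff_mem p hp
  unfold filter_paired_commands_only filter_paired_commands_only_alt
  dsimp only
  have hn : n.filter (fun c => PySem.Set.contains
      (sm.foldl (fun s c =>
        match (PySem.Dict.mk p).get? c with
        | some v => if n.contains v then (PySem.Set.add s.1 v, PySem.Set.add s.2 c) else s
        | none => s)
        (n.foldl (fun s c =>
          match (PySem.Dict.mk p).get? c with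
          | some v => if sm.contains v then (PySem.Set.add s.1 c, PySem.Set.add s.2 v) else s
          | none => s) (PySem.Set.empty, PySem.Set.empty))).1 c) =
      n.filter (fun c => p.any (fun kv =>
        (kv.1 == c && PySem.Set.contains (PySem.Set.ofList sm) kv.2) ||
        (kv.2 == c && PySem.Set.contains (PySem.Set.ofList sm) kv.1))) := by
    apply List.filter_congr
    intro c hc
    rw [Bool.eq_iff_iff, PySem.Set.contains_iff, anyB,
        (memA2 (PySem.Dict.mk p) n sm _ c).1, (memA1 (PySem.Dict.mk p) sm n _ c).1]
    simp only [hget, PySem.Set.empty, List.not_mem_nil, false_or]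
    constructor
    · rintro (⟨c', _, v, hmem, hvsm, rfl⟩ | ⟨c', hc'sm, v, hmem, _, rfl⟩)
      · exact ⟨(c, v), hmem, Or.inl ⟨rfl, hvsm⟩⟩
      · exact ⟨(c', c), hmem, Or.inr ⟨rfl, hc'sm⟩⟩
    · rintro ⟨kv, hkv, (⟨rfl, h2⟩ | ⟨rfl, h2⟩)⟩
      · exact Or.inl ⟨kv.1, hc, kv.2, by simpa using hkv, h2, rfl⟩
      · exact Or.inr ⟨kv.1, h2, kv.2, by simpa using hkv, hc, rfl⟩
  have hs : sm.filter (fun c => PySem.Set.contains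
      (sm.foldl (fun s c =>
        match (PySem.Dict.mk p).get? c with
        | some v => if n.contains v then (PySem.Set.add s.1 v, PySem.Set.add s.2 c) else s
        | none => s)
        (n.foldl (fun s c =>
          match (PySem.Dict.mk p).get? c with
          | some v => if sm.contains v then (PySem.Set.add s.1 c, PySem.Set.add s.2 v) else s
          | none => s) (PySem.Set.empty, PySem.Set.empty))).2 c) =
      sm.filter (fun c => p.any (fun kv =>
        (kv.1 == c && PySem.Set.contains (PySem.Set.ofList n) kv.2) ||
        (kv.2 == c && PySem.Set.contains (PySem.Set.ofList n) kv.1))) := by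
    apply List.filter_congr
    intro c hc
    rw [Bool.eq_iff_iff, PySem.Set.contains_iff, anyB,
        (memA2 (PySem.Dict.mk p) n sm _ c).2, (memA1 (PySem.Dict.mk p) sm n _ c).2]
    simp only [hget, PySem.Set.empty, List.not_mem_nil, false_or]
    constructor
    · rintro (⟨c', hc'n, v, hmem, _, rfl⟩ | ⟨c', _, v, hmem, hvn, rfl⟩)
      · exact ⟨(c', c), hmem, Or.inr ⟨rfl, hc'n⟩⟩
      · exact ⟨(c, v), hmem, Or.inl ⟨rfl, hvn⟩⟩
    · rintro ⟨kv, hkv, (⟨rfl, h2⟩ | ⟨rfl, h2⟩)⟩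
      · exact Or.inr ⟨kv.1, hc, kv.2, by simpa using hkv, h2, rfl⟩
      · exact Or.inl ⟨kv.1, h2, kv.2, by simpa using hkv, hc, rfl⟩
  rw [hn, hs]

-- ===== VERDICT (by name: the statement is the Claim_ definition above) =====
theorem filter_paired_commands_only_spec : Claim_equal_filter_paired_commands_only := by
  intro n sm p _ hpre
  exact main_eq n sm p hpre
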